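-- pv_equiv track=rewrite | github.com/karthikpappu/pyc_source | pycfiles/ChatExchange-0.0.4-py3-none-any/tokenizer.cpython-36.py | _get_indentation
-- ===== SOURCE A (Python) =====
-- def _get_indentation(text):
--     """
--     Returns a string that is made
--     of all the spaces at the beginning of `text`.
--     """
--     i = 0
--     length = len(text)
--     indentation = ''
--     while i < length and text[i].isspace():
--         indentation += text[i]
--         i += 1
--
--     if indentation != '':
--         return indentation
-- ===== SOURCE B (Python) =====
-- def _get_indentation(text):
--     """
--     Returns a string that is made
--     of all the spaces at the beginning of `text`.
--     """
--     stripped = text.lstrip()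
--     indent = text[:len(text) - len(stripped)]
--     if indent != '':
--         return indent
-- ===== Notes on version B (the rewrite author's own statement) =====
-- stated objective: idiomatic
-- what changed: Replaces the index-driven character-by-character accumulation loop with a closed-form lstrip-and-slice: the indentation is the prefix of length len(text)-len(text.lstrip()).
import Mathlib
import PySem

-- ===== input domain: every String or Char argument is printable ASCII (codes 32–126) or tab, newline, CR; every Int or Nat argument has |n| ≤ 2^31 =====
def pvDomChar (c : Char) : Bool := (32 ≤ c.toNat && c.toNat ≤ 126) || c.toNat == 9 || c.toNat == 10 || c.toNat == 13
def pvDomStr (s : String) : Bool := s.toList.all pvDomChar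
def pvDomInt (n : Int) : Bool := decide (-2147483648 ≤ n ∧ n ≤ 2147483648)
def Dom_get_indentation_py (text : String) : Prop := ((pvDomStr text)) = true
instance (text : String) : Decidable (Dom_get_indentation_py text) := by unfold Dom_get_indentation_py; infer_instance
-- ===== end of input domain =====

-- B replaces A's index-driven char-accumulation while loop by the closed form lstrip-and-slice (idiomatic).

-- ===== PORT A =====
-- the while loop: state (i, indentation), advancing while i < length and text[i].isspace()
def getIndentLoopA (chars : List Char) (i : Nat) (indentation : List Char) : List Char :=
  if h : i < chars.length then
    if PySem.Chars.isspace chars[i] then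
      getIndentLoopA chars (i + 1) (indentation ++ [chars[i]])
    else indentation
  else indentation
termination_by chars.length - i

def get_indentation_py (text : String) : Option String :=
  let indentation := getIndentLoopA text.toList 0 []
  if indentation ≠ [] then some (String.ofList indentation) else none

-- ===== PORT B =====
def get_indentation_py_alt (text : String) : Option String :=
  let stripped := PySem.Str.lstrip text
  let indent := PySem.Str.slice text none (some ((PySem.Str.len text : Int) - PySem.Str.len stripped))
  if indent ≠ "" then some indent else none

-- ===== PRECONDITION & SPEC =====
def Spec_get_indentation_py (text : String) (out : Option String) : Prop := out = get_indentation_py_alt text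
instance (text : String) (out : Option String) : Decidable (Spec_get_indentation_py text out) := by unfold Spec_get_indentation_py; infer_instance

-- ===== CLAIM (what is proved, stated in full; the proofs are below) =====
def Claim_equal_get_indentation_py : Prop := ∀ (text : String), Dom_get_indentation_py text → Spec_get_indentation_py text (get_indentation_py text)

-- ===== LEMMAS AND PROOFS =====

-- A's loop, started at index i with accumulator acc, appends the isspace-takeWhile of the tail.
theorem getIndentLoopA_eq (chars : List Char) (i : Nat) (acc : List Char) :
    getIndentLoopA chars i acc = acc ++ (chars.drop i).takeWhile PySem.Chars.isspace := by
  induction hn : chars.length - i generalizing i acc with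
  | zero =>
    unfold getIndentLoopA
    have : ¬ i < chars.length := by omega
    simp [this, List.drop_eq_nil_of_le (by omega : chars.length ≤ i)]
  | succ n ih =>
    have hlt : i < chars.length := by omega
    unfold getIndentLoopA
    have hdrop : chars.drop i = chars[i] :: chars.drop (i + 1) :=
      (List.drop_eq_getElem_cons hlt)
    by_cases hsp : PySem.Chars.isspace chars[i]
    · rw [dif_pos hlt, if_pos hsp, ih (i + 1) _ (by omega), hdrop,
        List.takeWhile_cons_of_pos hsp, List.append_assoc, List.singleton_append]
    · rw [dif_pos hlt, if_neg hsp, hdrop, List.takeWhile_cons_of_neg hsp, List.append_nil]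

-- B's slice is the same takeWhile prefix.
theorem alt_indent_eq (text : String) :
    PySem.Str.slice text none (some ((PySem.Str.len text : Int) - PySem.Str.len (PySem.Str.lstrip text)))
      = String.ofList (text.toList.takeWhile PySem.Chars.isspace) := by
  set cs := text.toList with hcs
  have hlen : (PySem.Str.len text : Int) - PySem.Str.len (PySem.Str.lstrip text)
      = ((cs.takeWhile PySem.Chars.isspace).length : Int) := by
    have h1 : PySem.Str.len text = cs.length := by
      simp [PySem.Str.len_eq, hcs]
    have h2 : PySem.Str.len (PySem.Str.lstrip text)
        = (cs.dropWhile PySem.Chars.isspace).length := by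
      simp [PySem.Str.len_eq, PySem.Str.toList_lstrip, PySem.Chars.lstrip, hcs]
    have h3 : (cs.takeWhile PySem.Chars.isspace).length
        + (cs.dropWhile PySem.Chars.isspace).length = cs.length := by
      rw [← List.length_append, List.takeWhile_append_dropWhile]
    rw [h1, h2]; omega
  unfold PySem.Str.slice
  rw [show text.toList = cs from rfl, hlen]
  congr 1
  rw [PySem.Chars.slice_eq_listSlice,
      PySem.List.slice_to cs (by positivity)]
  rw [Int.toNat_natCast]
  exact ((List.prefix_iff_eq_take).1 (List.takeWhile_prefix _)).symm

-- ===== VERDICT (by name: the statement is the Claim_ definition above) =====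
theorem get_indentation_py_spec : Claim_equal_get_indentation_py := by
  intro text _
  unfold Spec_get_indentation_py get_indentation_py get_indentation_py_alt
  simp only [getIndentLoopA_eq, alt_indent_eq, List.drop_zero, List.nil_append]
  by_cases h : text.toList.takeWhile PySem.Chars.isspace = []
  · simp [h]
  · have h2 : String.ofList (text.toList.takeWhile PySem.Chars.isspace) ≠ "" := by
      intro hcontra
      apply h
      have := congrArg String.toList hcontra
      simpa using this
    simp [h, h2]
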